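-- pv_equiv track=rewrite | github.com/erikwii/sscode | coba.py | split_tol
-- ===== SOURCE A (Python) =====
-- def split_tol(test_list, tol):
--     res = []
--     last = test_list[0]
--     for ele in test_list:
--         if ele-last > tol:
--             yield res
--             res = []
--         res.append(ele)
--         last = ele
--     yield res
-- ===== SOURCE B (Python) =====
-- def split_tol(test_list, tol):
--     # Pass 1: collect the break indices (where the gap to the previous element exceeds tol).
--     last = test_list[0]
--     breaks = []
--     for i, ele in enumerate(test_list):
--         if ele - last > tol:
--             breaks.append(i)
--         last = ele
--     # Pass 2: emit the groups as slices between consecutive break indices.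
--     start = 0
--     for b in breaks:
--         yield test_list[start:b]
--         start = b
--     yield test_list[start:]
-- ===== Notes on version B (the rewrite author's own statement) =====
-- stated objective: alternative
-- what changed: B replaces A's accumulate-and-flush single pass with two passes: it first builds a table of break indices, then emits each group as a slice of the input between consecutive breaks.
import Mathlib
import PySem

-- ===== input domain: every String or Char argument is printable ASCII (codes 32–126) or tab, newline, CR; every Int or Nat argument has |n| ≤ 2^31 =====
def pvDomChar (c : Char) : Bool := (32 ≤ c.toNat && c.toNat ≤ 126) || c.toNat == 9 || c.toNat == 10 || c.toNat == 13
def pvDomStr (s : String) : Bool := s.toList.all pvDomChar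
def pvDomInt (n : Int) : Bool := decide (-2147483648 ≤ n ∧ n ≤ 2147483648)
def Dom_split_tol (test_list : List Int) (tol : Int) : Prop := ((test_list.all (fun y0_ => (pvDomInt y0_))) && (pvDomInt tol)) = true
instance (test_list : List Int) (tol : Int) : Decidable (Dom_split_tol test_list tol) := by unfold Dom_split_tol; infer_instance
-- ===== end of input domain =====

-- Both programs are generators compared via list(); B builds the break-index table first,
-- then produces the groups by slicing — an alternative decomposition, not faster.
-- ===== PORT A =====
-- A: res = []; last = test_list[0]; for ele: if ele-last > tol: yield res; res=[]; res.append(ele); last=ele; yield res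
def split_tol (test_list : List Int) (tol : Int) : List (List Int) :=
  match test_list with
  | [] => []   -- Python raises IndexError on test_list[0]; excluded by Pre_split_tol
  | h :: _ =>
    let st := test_list.foldl
      (fun (st : List (List Int) × List Int × Int) ele =>
        let (out, res, last) := st
        if ele - last > tol then (out ++ [res], [ele], ele)
        else (out, res ++ [ele], ele))
      ([], [], h)
    st.1 ++ [st.2.1]

-- ===== PORT B =====
-- first loop of Source B: for i, ele in enumerate(test_list): if ele - last > tol: breaks.append(i); last = ele
def breaksOf (tol : Int) : Int -> Int -> List Int -> List Int
  | _, _, [] => []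
  | i, last, e :: t =>
    (if e - last > tol then [i] else []) ++ breaksOf tol (i + 1) e t

-- second loop of Source B: for b in breaks: yield test_list[start:b]; start = b; then yield test_list[start:]
def slicesAt (l : List Int) : Int -> List Int -> List (List Int)
  | start, [] => [PySem.List.slice l (some start) none]
  | start, b :: bs => PySem.List.slice l (some start) (some b) :: slicesAt l b bs

def split_tol_alt (test_list : List Int) (tol : Int) : List (List Int) :=
  match test_list with
  | [] => []   -- Python raises IndexError on test_list[0]; excluded by Pre_split_tol
  | h :: _ => slicesAt test_list 0 (breaksOf tol 0 h test_list)

-- ===== PRECONDITION & SPEC =====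
-- Pre_ excludes only the empty list, on which A (and B) raise IndexError at test_list[0].
def Pre_split_tol (test_list : List Int) (tol : Int) : Prop := test_list ≠ []
instance (test_list : List Int) (tol : Int) : Decidable (Pre_split_tol test_list tol) := by unfold Pre_split_tol; infer_instance
def pvWitness_split_tol : List Int × Int := ([1, 2, 9, 10], 3)
def Spec_split_tol (test_list : List Int) (tol : Int) (out : List (List Int)) : Prop := out = split_tol_alt test_list tol
instance (test_list : List Int) (tol : Int) (out : List (List Int)) : Decidable (Spec_split_tol test_list tol out) := by unfold Spec_split_tol; infer_instance

-- ===== CLAIM (what is proved, stated in full; the proofs are below) =====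
def Claim_equal_split_tol : Prop := ∀ (test_list : List Int) (tol : Int), Dom_split_tol test_list tol → Pre_split_tol test_list tol → Spec_split_tol test_list tol (split_tol test_list tol)

-- ===== LEMMAS AND PROOFS =====
-- reference recursion both sides are reduced to
def groupRec (tol last : Int) (cur : List Int) : List Int -> List (List Int)
  | [] => [cur]
  | e :: t =>
    if e - last > tol then cur :: groupRec tol e [e] t
    else groupRec tol e (cur ++ [e]) t

-- A's fold from an arbitrary state equals out ++ groupRec
theorem foldA_eq_groupRec (tol : Int) (xs : List Int) :
    ∀ (out : List (List Int)) (res : List Int) (last : Int),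
      (xs.foldl
        (fun (st : List (List Int) × List Int × Int) ele =>
          if ele - st.2.2 > tol then (st.1 ++ [st.2.1], [ele], ele)
          else (st.1, st.2.1 ++ [ele], ele)) (out, res, last)).1
        ++ [(xs.foldl
        (fun (st : List (List Int) × List Int × Int) ele =>
          if ele - st.2.2 > tol then (st.1 ++ [st.2.1], [ele], ele)
          else (st.1, st.2.1 ++ [ele], ele)) (out, res, last)).2.1]
      = out ++ groupRec tol last res xs := by
  induction xs with
  | nil => intro out res last; simp [groupRec]
  | cons e t ih =>
    intro out res last
    simp only [List.foldl_cons, groupRec]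
    by_cases h : e - last > tol
    · simp only [if_pos h]
      rw [ih (out ++ [res]) [e] e]
      simp
    · simp only [if_neg h]
      rw [ih out (res ++ [e]) e]

-- B's two passes, from index i into l, equal groupRec on the remaining suffix
theorem slices_breaks_eq_groupRec (tol : Int) :
    ∀ (xs : List Int) (l : List Int) (i start : Nat) (last : Int),
      xs = l.drop i → i ≤ l.length → start ≤ i →
      slicesAt l (start : Int) (breaksOf tol (i : Int) last xs)
        = groupRec tol last ((l.drop start).take (i - start)) xs := by
  intro xs
  induction xs with
  | nil =>
    intro l i start last hxs hi hs
    have hil : i = l.length := by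
      have := congrArg List.length hxs
      simp [List.length_drop] at this
      omega
    simp only [breaksOf, slicesAt, groupRec]
    rw [PySem.List.slice_from_natCast]
    congr 1
    subst hil
    rw [List.take_of_length_le (by simp [List.length_drop])]
  | cons e t ih =>
    intro l i start last hxs hi hs
    have hit : i < l.length := by
      by_contra h
      rw [List.drop_eq_nil_of_le (by omega)] at hxs
      exact (List.cons_ne_nil e t) hxs
    have hdrop1 : l.drop (i + 1) = t := by
      have h1 : l.drop (i+1) = (l.drop i).drop 1 := by rw [List.drop_drop]
      rw [h1, ← hxs]; simp
    have hgete : l[i]'hit = e := by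
      have h0 : (l.drop i)[0]'(by rw [← hxs]; simp) = e := by simp [← hxs]
      simpa using h0
    have hget? : l[i]? = some e := by rw [List.getElem?_eq_getElem hit, hgete]
    simp only [breaksOf, groupRec]
    by_cases h : e - last > tol
    · simp only [if_pos h, List.singleton_append, slicesAt]
      have ihh := ih l (i + 1) i e hdrop1.symm (by omega) (by omega)
      push_cast at ihh
      rw [ihh]
      congr 1
      · rw [PySem.List.slice_natCast]
      · rw [show i + 1 - i = 1 by omega, List.take_one, List.head?_drop, hget?]
        rfl
    · simp only [if_neg h, List.nil_append]
      have ihh := ih l (i + 1) start e hdrop1.symm (by omega) (by omega)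
      push_cast at ihh
      rw [ihh]
      congr 1
      rw [show i + 1 - start = (i - start) + 1 by omega, List.take_add_one]
      congr 1
      rw [List.getElem?_drop, show start + (i - start) = i by omega, hget?]
      rfl

-- ===== VERDICT (by name: the statement is the Claim_ definition above) =====
theorem split_tol_spec : Claim_equal_split_tol := by
  intro test_list tol _ hpre
  unfold Spec_split_tol
  match test_list with
  | [] => exact absurd rfl hpre
  | h :: t =>
    show split_tol (h :: t) tol = split_tol_alt (h :: t) tol
    unfold split_tol split_tol_alt
    simp only
    rw [foldA_eq_groupRec tol (h :: t) [] [] h]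
    have hB := slices_breaks_eq_groupRec tol (h :: t) (h :: t) 0 0 h rfl (by simp) le_rfl
    simp only [Nat.cast_zero, Nat.sub_zero, List.drop_zero, List.take_zero] at hB
    rw [hB]
    simp
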